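-- pv_equiv track=rewrite | github.com/kk-gc/tide_watcher | tides_model.py | _clean_tide_table
-- ===== SOURCE A (Python) =====
-- def _clean_tide_table(tide_table):
--     output = []
--     is_inside_tag = False
--     for i in range(len(tide_table)):
--         if tide_table[i] == '>':
--             is_inside_tag = True
--             continue
--         if tide_table[i] == '<':
--             is_inside_tag = False
--             continue
--
--         if is_inside_tag:
--             output.append(tide_table[i])
--
--     clean_tide_table = ''.join(output)
--     return clean_tide_table
-- ===== SOURCE B (Python) =====
-- def _clean_tide_table(tide_table):
--     return ''.join(seg.split('<')[0] for seg in tide_table.split('>')[1:])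
-- ===== Notes on version B (the rewrite author's own statement) =====
-- stated objective: faster
-- what changed: Replaces the char-by-char toggle state machine with split-on-'>' / keep-text-before-first-'<' / join, moving the per-character work into C-level str.split and str.join.
import Mathlib
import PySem

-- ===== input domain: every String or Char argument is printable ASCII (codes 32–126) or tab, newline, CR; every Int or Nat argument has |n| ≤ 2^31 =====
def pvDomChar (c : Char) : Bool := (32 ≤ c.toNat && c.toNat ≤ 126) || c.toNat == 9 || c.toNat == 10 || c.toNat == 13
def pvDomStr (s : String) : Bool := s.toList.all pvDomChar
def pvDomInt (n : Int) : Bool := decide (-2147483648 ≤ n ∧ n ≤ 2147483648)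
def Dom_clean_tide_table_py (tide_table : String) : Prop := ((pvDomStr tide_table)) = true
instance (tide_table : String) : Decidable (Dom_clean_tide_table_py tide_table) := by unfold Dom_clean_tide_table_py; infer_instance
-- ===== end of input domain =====

-- B replaces A's char-by-char toggle state machine with split-on-'>' / take-before-'<' / join; a timing run measured B faster (constant factor).


-- ===== PORT A =====
def clean_tide_table_py (tide_table : String) : String :=
  let cs := tide_table.toList
  -- for i in range(len(tide_table)): tide_table[i] — i is always in range, so pyGetD is exact here
  let st := (PySem.List.pyRange 0 (PySem.Str.len tide_table) 1).foldl
    (fun (st : List Char × Bool) i =>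
      if PySem.List.pyGetD cs i ' ' = '>' then (st.1, true)        -- is_inside_tag = True; continue
      else if PySem.List.pyGetD cs i ' ' = '<' then (st.1, false)  -- is_inside_tag = False; continue
      else if st.2 then (st.1 ++ [PySem.List.pyGetD cs i ' '], st.2) else st)
    ([], false)
  String.ofList st.1  -- ''.join(output) over single-char strings

-- ===== PORT B =====
def clean_tide_table_py_alt (tide_table : String) : String :=
  -- tide_table.split('>'): the separator is the nonempty literal ">", so split? is always `some`; getD is exact
  let parts := (PySem.Str.split? tide_table ">").getD []
  -- parts[1:]
  let segs := PySem.List.slice parts (some 1) none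
  -- seg.split('<')[0]: split always returns a nonempty list, so index 0 never raises; pyGetD is exact
  PySem.Str.join "" (segs.map (fun seg => PySem.List.pyGetD ((PySem.Str.split? seg "<").getD []) 0 ""))

-- ===== PRECONDITION & SPEC =====
def Spec_clean_tide_table_py (tide_table : String) (out : String) : Prop := out = clean_tide_table_py_alt tide_table
instance (tide_table : String) (out : String) : Decidable (Spec_clean_tide_table_py tide_table out) := by unfold Spec_clean_tide_table_py; infer_instance

-- ===== CLAIM (what is proved, stated in full; the proofs are below) =====
def Claim_equal_clean_tide_table_py : Prop := ∀ (tide_table : String), Dom_clean_tide_table_py tide_table → Spec_clean_tide_table_py tide_table (clean_tide_table_py tide_table)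

-- ===== LEMMAS AND PROOFS =====

-- Recursive specification of A's state machine: fAB cs b = characters A collects from cs starting with flag b.
def fAB : List Char → Bool → List Char
  | [], _ => []
  | c :: cs, b =>
    if c = '>' then fAB cs true
    else if c = '<' then fAB cs false
    else if b then c :: fAB cs b else fAB cs b

-- Recursive form of splitting a char list at every occurrence of the single character d.
def splits (d : Char) : List Char → List (List Char)
  | [] => [[]]
  | c :: cs => if c = d then [] :: splits d cs else (splits d cs).modifyHead (c :: ·)

lemma splits_ne_nil (d : Char) (cs : List Char) : splits d cs ≠ [] := by
  induction cs with
  | nil => simp [splits]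
  | cons c cs ih =>
    simp only [splits]
    split
    · simp
    · cases h : splits d cs with
      | nil => exact absurd h ih
      | cons a l => simp [List.modifyHead]

lemma foldA (cs : List Char) : ∀ (acc : List Char) (b : Bool),
    (cs.foldl (fun (st : List Char × Bool) c =>
      if c = '>' then (st.1, true)
      else if c = '<' then (st.1, false)
      else if st.2 then (st.1 ++ [c], st.2) else st) (acc, b)).1 = acc ++ fAB cs b := by
  induction cs with
  | nil => intro acc b; simp [fAB]
  | cons c cs ih =>
    intro acc b
    by_cases h1 : c = '>'
    · simp [fAB, h1, ih]
    · by_cases h2 : c = '<'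
      · simp [fAB, h2, ih]
      · cases b with
        | false => simp [fAB, h1, h2, ih]
        | true => simp [fAB, h1, h2, ih]

lemma go_spec (d : Char) : ∀ (fuel : Nat) (l cur : List Char) (acc : List (List Char)), l.length ≤ fuel →
    PySem.Chars.splitOn.go [d] fuel l cur acc
      = acc.reverse ++ (splits d l).modifyHead (cur.reverse ++ ·) := by
  intro fuel
  induction fuel with
  | zero =>
    intro l cur acc h
    have hl : l = [] := List.eq_nil_of_length_eq_zero (Nat.le_zero.mp h)
    subst hl
    rw [PySem.Chars.splitOn.go.eq_def]
    simp [splits, List.modifyHead]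
  | succ fuel ih =>
    intro l cur acc h
    cases l with
    | nil =>
      rw [PySem.Chars.splitOn.go.eq_def]
      simp [splits, List.modifyHead]
    | cons c rest =>
      rw [PySem.Chars.splitOn.go.eq_def]
      by_cases hc : c = d
      · have hpre : List.isPrefixOf [d] (c :: rest) = true := by simp [List.isPrefixOf, hc]
        simp only [hpre, if_pos, List.length_cons, List.length_nil, Nat.zero_add,
          List.drop_succ_cons, List.drop_zero]
        rw [ih rest [] (cur.reverse :: acc) (by simpa using Nat.succ_le_succ_iff.mp h)]
        cases hs : splits d rest with
        | nil => exact absurd hs (splits_ne_nil d rest)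
        | cons a l => simp [splits, hc, hs, List.modifyHead]
      · have hpre : List.isPrefixOf [d] (c :: rest) = false := by
          simp [List.isPrefixOf]
          exact fun hdc => absurd hdc.symm hc
        simp only [hpre, Bool.false_eq_true, if_false]
        rw [ih rest (c :: cur) acc (by simpa using Nat.succ_le_succ_iff.mp h)]
        cases hs : splits d rest with
        | nil => exact absurd hs (splits_ne_nil d rest)
        | cons a l =>
          simp [splits, hc, hs, List.modifyHead]

lemma splitOn_single (d : Char) (cs : List Char) :
    PySem.Chars.splitOn cs [d] = splits d cs := by
  unfold PySem.Chars.splitOn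
  rw [go_spec d (cs.length + 1) cs [] [] (by omega)]
  cases hs : splits d cs with
  | nil => exact absurd hs (splits_ne_nil d cs)
  | cons a l => simp [List.modifyHead]

lemma pyGetD_splits_zero (d : Char) (cs : List Char) :
    PySem.List.pyGetD (splits d cs) 0 [] = cs.takeWhile (· ≠ d) := by
  induction cs with
  | nil => simp [splits, PySem.List.pyGetD]
  | cons c cs ih =>
    simp only [splits]
    by_cases hc : c = d
    · simp [hc, PySem.List.pyGetD, List.takeWhile]
    · cases h : splits d cs with
      | nil => exact absurd h (splits_ne_nil d cs)
      | cons a l =>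
        rw [h] at ih
        simp [PySem.List.pyGetD, List.modifyHead, List.takeWhile, hc] at *
        exact ih

lemma main_chars (cs : List Char) :
    fAB cs true = ((splits '>' cs).map (fun seg => seg.takeWhile (· ≠ '<'))).flatten
    ∧ fAB cs false = (((splits '>' cs).drop 1).map (fun seg => seg.takeWhile (· ≠ '<'))).flatten := by
  induction cs with
  | nil => simp [fAB, splits]
  | cons c cs ih =>
    obtain ⟨ihT, ihF⟩ := ih
    by_cases h1 : c = '>'
    · subst h1
      constructor <;> simp [fAB, splits, ihT]
    · by_cases h2 : c = '<'
      · subst h2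
        cases h : splits '>' cs with
        | nil => exact absurd h (splits_ne_nil _ cs)
        | cons a l =>
          rw [h] at ihT ihF
          constructor <;>
            simp_all [fAB, splits, List.modifyHead, List.takeWhile]
      · cases h : splits '>' cs with
        | nil => exact absurd h (splits_ne_nil _ cs)
        | cons a l =>
          rw [h] at ihT ihF
          constructor <;>
            simp_all [fAB, splits, List.modifyHead, List.takeWhile]

lemma join_nil_flatten (xss : List (List Char)) : PySem.Chars.join [] xss = xss.flatten := by
  unfold PySem.Chars.join
  induction xss with
  | nil => simp [List.intercalate]
  | cons a l ih => cases l <;> simp_all [List.intercalate, List.intersperse]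

lemma split_toList (s : String) (d : Char) :
    ∃ parts, PySem.Str.split? s (String.ofList [d]) = some parts
      ∧ parts.map String.toList = splits d s.toList := by
  have h := PySem.Str.split?_map s (String.ofList [d])
  rw [show (String.ofList [d]).toList = [d] by simp] at h
  rw [show PySem.Chars.split? s.toList [d] = some (splits d s.toList) by
        simp [PySem.Chars.split?, splitOn_single]] at h
  cases hp : PySem.Str.split? s (String.ofList [d]) with
  | none => rw [hp] at h; simp at h
  | some parts =>
    rw [hp] at h
    exact ⟨parts, rfl, by simpa using h⟩

-- ===== VERDICT (by name: the statement is the Claim_ definition above) =====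
theorem clean_tide_table_py_spec : Claim_equal_clean_tide_table_py := by
  intro t _
  unfold Spec_clean_tide_table_py clean_tide_table_py clean_tide_table_py_alt
  simp only [PySem.Str.len]
  rw [PySem.List.foldl_pyRange_zero_pyGetD' t.toList ' '
    (fun (st : List Char × Bool) c =>
      if c = '>' then (st.1, true)
      else if c = '<' then (st.1, false)
      else if st.2 then (st.1 ++ [c], st.2) else st) ([], false)]
  rw [foldA t.toList [] false, List.nil_append]
  obtain ⟨parts, hp, hpl⟩ := split_toList t '>'
  rw [show (">" : String) = String.ofList ['>'] from rfl]
  rw [hp, Option.getD_some, PySem.List.slice_from parts (by norm_num)]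
  rw [PySem.Str.join, show ("" : String).toList = [] from rfl, join_nil_flatten]
  refine congrArg String.ofList ?_
  have hmap : ∀ seg : String,
      (PySem.List.pyGetD ((PySem.Str.split? seg "<").getD []) 0 "").toList
        = seg.toList.takeWhile (· ≠ '<') := by
    intro seg
    obtain ⟨ps, hps, hpsl⟩ := split_toList seg '<'
    rw [show ("<" : String) = String.ofList ['<'] from rfl, hps, Option.getD_some]
    rw [← PySem.List.pyGetD_map String.toList ps 0 "", hpsl]
    simpa using pyGetD_splits_zero '<' seg.toList
  calc fAB t.toList false
      = (((splits '>' t.toList).drop 1).map (fun seg => seg.takeWhile (· ≠ '<'))).flatten :=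
        (main_chars t.toList).2
    _ = _ := by
        rw [← hpl, ← List.map_drop]
        simp only [Int.toNat_one, List.map_map, Function.comp_def, hmap]
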